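-- pv_equiv track=rewrite | github.com/julzhk/project-euler | right_rotators.py | right_rotation
-- ===== SOURCE A (Python) =====
-- def right_rotation(n):
--     m = n
--     d = m % 10
--     m //= 10
--     t = m
--     i = 0
--     while m:
--         i += 1
--         m //= 10
--     return d*10**(i) + t
-- ===== SOURCE B (Python) =====
-- def right_rotation(n):
--     ds = [n % 10]
--     n //= 10
--     while n:
--         ds.append(n % 10)
--         n //= 10
--     ds = ds[1:] + ds[:1]
--     v = 0
--     for x in reversed(ds):
--         v = v * 10 + x
--     return v
-- ===== Notes on version B (the rewrite author's own statement) =====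
-- stated objective: alternative
-- what changed: A strips the last digit, counts the remaining digits by repeated division and reattaches it arithmetically via d*10**i; B instead materializes the full little-endian digit list, rotates it by list slicing (ds[1:] + ds[:1]) and rebuilds the number with a Horner fold over the reversed list
import Mathlib
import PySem

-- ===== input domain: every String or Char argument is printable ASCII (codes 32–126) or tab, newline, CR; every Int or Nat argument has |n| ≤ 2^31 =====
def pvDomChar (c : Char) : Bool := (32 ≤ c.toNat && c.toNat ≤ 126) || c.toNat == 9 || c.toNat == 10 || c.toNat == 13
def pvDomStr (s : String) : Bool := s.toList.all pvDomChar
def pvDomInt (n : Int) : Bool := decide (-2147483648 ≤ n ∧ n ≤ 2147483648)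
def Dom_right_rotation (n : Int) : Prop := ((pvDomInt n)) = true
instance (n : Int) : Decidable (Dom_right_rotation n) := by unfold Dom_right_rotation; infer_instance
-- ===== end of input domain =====

-- B replaces A's digit-count-and-exponentiate arithmetic by materializing the little-endian
-- digit list, rotating it with list slicing and rebuilding the number with a Horner fold
-- (objective: alternative). For negative n BOTH Pythons loop forever (m //= 10 stalls at -1),
-- so Pre_ admits exactly the inputs on which A returns: 0 ≤ n.


-- ===== PORT A =====
-- A's `while m: i += 1; m //= 10` loop, run on m.toNat (exact for m ≥ 0; for m < 0 the
-- Python loop never terminates, those inputs are outside Pre_).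
def rrCountLoop (m : Nat) (i : Nat) : Nat :=
  if m = 0 then i else rrCountLoop (m / 10) (i + 1)

def right_rotation (n : Int) : Int :=
  let m := n
  let d := PySem.Int.mod m 10
  let m := PySem.Int.floordiv m 10
  let t := m
  let i := rrCountLoop m.toNat 0
  d * 10 ^ i + t

-- ===== PORT B =====
-- B's `while n: ds.append(n % 10); n //= 10` loop, run on n.toNat (exact for n ≥ 0;
-- for n < 0 the Python loop never terminates, those inputs are outside Pre_).
def rrDigitsLoop (m : Nat) (ds : List Int) : List Int :=
  if m = 0 then ds else rrDigitsLoop (m / 10) (ds ++ [((m % 10 : Nat) : Int)])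

def right_rotation_alt (n : Int) : Int :=
  let ds := [PySem.Int.mod n 10]
  let n1 := PySem.Int.floordiv n 10
  let ds := rrDigitsLoop n1.toNat ds
  let ds := PySem.List.slice ds (some 1) none ++ PySem.List.slice ds none (some 1)
  ds.reverse.foldl (fun v x => v * 10 + x) 0

-- ===== PRECONDITION & SPEC =====
-- Pre_ excludes exactly the negative inputs, on which the Python A never returns
-- (its `m //= 10` loop stalls at -1 and loops forever); B's Python loops forever there too.
def Pre_right_rotation (n : Int) : Prop := 0 ≤ n
instance (n : Int) : Decidable (Pre_right_rotation n) := by unfold Pre_right_rotation; infer_instance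
def pvWitness_right_rotation : Int := (1234)
def Spec_right_rotation (n : Int) (out : Int) : Prop := out = right_rotation_alt n
instance (n : Int) (out : Int) : Decidable (Spec_right_rotation n out) := by unfold Spec_right_rotation; infer_instance

-- ===== CLAIM (what is proved, stated in full; the proofs are below) =====
def Claim_equal_right_rotation : Prop := ∀ (n : Int), Dom_right_rotation n → Pre_right_rotation n → Spec_right_rotation n (right_rotation n)

-- ===== LEMMAS AND PROOFS =====

-- little-endian digit list of m (the list B's loop produces past its seed element)
def rrDigits (m : Nat) : List Int :=
  if m = 0 then [] else ((m % 10 : Nat) : Int) :: rrDigits (m / 10)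

-- value of a little-endian digit list
def rrVal (L : List Int) : Int :=
  match L with
  | [] => 0
  | x :: t => x + 10 * rrVal t

theorem rrDigitsLoop_eq (m : Nat) : ∀ ds, rrDigitsLoop m ds = ds ++ rrDigits m := by
  induction m using Nat.strong_induction_on with
  | _ m ih =>
    intro ds
    by_cases h : m = 0
    · simp [rrDigitsLoop, rrDigits, h]
    · rw [rrDigitsLoop, rrDigits]
      simp only [h, if_false]
      rw [ih (m / 10) (Nat.div_lt_self (Nat.pos_of_ne_zero h) (by omega))]
      simp

theorem rrVal_digits (m : Nat) : rrVal (rrDigits m) = (m : Int) := by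
  induction m using Nat.strong_induction_on with
  | _ m ih =>
    by_cases h : m = 0
    · simp [rrDigits, rrVal, h]
    · rw [rrDigits]
      simp only [h, if_false, rrVal]
      rw [ih (m / 10) (Nat.div_lt_self (Nat.pos_of_ne_zero h) (by omega))]
      have := Nat.div_add_mod m 10
      push_cast
      omega

theorem rrDigits_length (m : Nat) : ∀ i, rrCountLoop m i = (rrDigits m).length + i := by
  induction m using Nat.strong_induction_on with
  | _ m ih =>
    intro i
    by_cases h : m = 0
    · simp [rrCountLoop, rrDigits, h]
    · rw [rrCountLoop, rrDigits]
      simp only [h, if_false, List.length_cons]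
      rw [ih (m / 10) (Nat.div_lt_self (Nat.pos_of_ne_zero h) (by omega))]
      omega

theorem rrVal_append_singleton (L : List Int) (x : Int) :
    rrVal (L ++ [x]) = rrVal L + x * 10 ^ L.length := by
  induction L with
  | nil => simp [rrVal]
  | cons y t ih => simp [rrVal, ih]; ring

theorem rrHorner_eq_val (L : List Int) :
    L.reverse.foldl (fun v x => v * 10 + x) 0 = rrVal L := by
  induction L with
  | nil => simp [rrVal]
  | cons y t ih =>
    simp only [List.reverse_cons, List.foldl_append, List.foldl_cons, List.foldl_nil, ih, rrVal]
    ring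

-- ===== VERDICT (by name: the statement is the Claim_ definition above) =====
theorem right_rotation_spec : Claim_equal_right_rotation := by
  intro n _ hn
  unfold Spec_right_rotation right_rotation right_rotation_alt
  simp only
  rw [rrDigitsLoop_eq]
  have hslice1 : PySem.List.slice ([PySem.Int.mod n 10] ++ rrDigits (PySem.Int.floordiv n 10).toNat) (some 1) none
      = rrDigits (PySem.Int.floordiv n 10).toNat := by
    rw [PySem.List.slice_from_one]; simp
  have hslice2 : PySem.List.slice ([PySem.Int.mod n 10] ++ rrDigits (PySem.Int.floordiv n 10).toNat) none (some 1)
      = [PySem.Int.mod n 10] := by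
    rw [PySem.List.slice_to _ (by omega)]; simp
  rw [hslice1, hslice2, rrHorner_eq_val, rrVal_append_singleton, rrVal_digits, rrDigits_length]
  have ht : PySem.Int.floordiv n 10 = ((PySem.Int.floordiv n 10).toNat : Int) := by
    have : 0 ≤ PySem.Int.floordiv n 10 := by
      rw [PySem.Int.floordiv_eq_ediv_of_pos (by omega)]
      exact Int.ediv_nonneg hn (by omega)
    omega
  rw [← ht]
  ring
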